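-- pv_equiv track=rewrite | github.com/tuplex/tuplex | benchmarks/hyperspecialization/list-generate/baseline.py | simple_func
-- ===== SOURCE A (Python) =====
-- def simple_func(simple_list):
--     my_dict = {}
--     for element in simple_list:
--         if element in my_dict:
--             my_dict[element] += 1
--         else:
--             my_dict[element] = 0
--     return my_dict
-- ===== SOURCE B (Python) =====
-- def simple_func(simple_list):
--     return {k: simple_list.count(k) - 1 for k in dict.fromkeys(simple_list)}
-- ===== Notes on version B (the rewrite author's own statement) =====
-- stated objective: alternative
-- what changed: Replaces the single-pass membership-test/accumulate dict loop with a comprehension over the distinct keys (dict.fromkeys) that computes each value directly as list.count(k) - 1.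
import Mathlib
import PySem

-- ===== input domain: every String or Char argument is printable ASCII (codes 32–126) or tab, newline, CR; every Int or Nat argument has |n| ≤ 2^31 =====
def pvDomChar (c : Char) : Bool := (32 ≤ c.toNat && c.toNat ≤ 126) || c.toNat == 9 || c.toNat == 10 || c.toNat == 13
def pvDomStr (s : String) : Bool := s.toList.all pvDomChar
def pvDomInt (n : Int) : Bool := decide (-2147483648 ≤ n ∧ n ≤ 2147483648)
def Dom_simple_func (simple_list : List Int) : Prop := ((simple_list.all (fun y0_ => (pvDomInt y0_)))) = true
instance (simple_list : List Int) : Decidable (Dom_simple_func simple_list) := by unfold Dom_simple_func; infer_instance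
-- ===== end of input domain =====

-- B replaces A's single-pass membership-test/accumulate dict loop by a comprehension over the
-- distinct keys (dict.fromkeys) computing each value directly as list.count(k) - 1 (alternative decomposition).


-- ===== PORT A =====
-- my_dict = {}; for element: if element in my_dict: my_dict[element] += 1 else: my_dict[element] = 0
def simple_func (simple_list : List Int) : List (Int × Int) :=
  (simple_list.foldl
    (fun my_dict element =>
      if my_dict.contains element then my_dict.modify element 0 (· + 1)
      else my_dict.insert element 0)
    (PySem.Dict.empty : PySem.Dict Int Int)).items

-- ===== PORT B =====
-- {k: simple_list.count(k) - 1 for k in dict.fromkeys(simple_list)}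
def simple_func_alt (simple_list : List Int) : List (Int × Int) :=
  (PySem.List.dedup simple_list).map
    (fun k => (k, (PySem.List.count simple_list k : Int) - 1))

-- ===== PRECONDITION & SPEC =====
def Spec_simple_func (simple_list : List Int) (out : List (Int × Int)) : Prop := out = simple_func_alt simple_list
instance (simple_list : List Int) (out : List (Int × Int)) : Decidable (Spec_simple_func simple_list out) := by unfold Spec_simple_func; infer_instance

-- ===== CLAIM (what is proved, stated in full; the proofs are below) =====
def Claim_equal_simple_func : Prop := ∀ (simple_list : List Int), Dom_simple_func simple_list → Spec_simple_func simple_list (simple_func simple_list)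

-- ===== LEMMAS AND PROOFS =====

-- A's loop step, written as a single insert (the modify branch is an insert by definition).
theorem pv_step_eq :
    (fun (d : PySem.Dict Int Int) (e : Int) =>
        if d.contains e then d.modify e 0 (· + 1) else d.insert e 0)
      = (fun d e => d.insert e (if d.contains e then d.getD e 0 + 1 else 0)) := by
  funext d e
  by_cases h : d.contains e
  · simp [h]; rfl
  · simp [h]

theorem pv_keys (xs : List Int) :
    (xs.foldl (fun (d : PySem.Dict Int Int) e =>
        d.insert e (if d.contains e then d.getD e 0 + 1 else 0)) PySem.Dict.empty).keys
      = PySem.Set.ofList xs := by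
  rw [PySem.Dict.keys_foldl_insert]
  simp [PySem.Set.update_nil_left]

-- the loop invariant: A's dict items are exactly B's list
theorem pv_items (xs : List Int) :
    (xs.foldl (fun (d : PySem.Dict Int Int) e =>
        d.insert e (if d.contains e then d.getD e 0 + 1 else 0)) PySem.Dict.empty).items
      = (PySem.List.dedup xs).map (fun k => (k, (PySem.List.count xs k : Int) - 1)) := by
  induction xs using List.reverseRecOn with
  | nil => rfl
  | append_singleton xs x ih =>
    rw [List.foldl_append]
    set d := xs.foldl (fun (d : PySem.Dict Int Int) e =>
        d.insert e (if d.contains e then d.getD e 0 + 1 else 0)) PySem.Dict.empty with hd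
    have hkeys : d.keys = PySem.Set.ofList xs := pv_keys xs
    have hnd : d.keys.Nodup := by rw [hkeys]; exact PySem.Set.nodup_ofList xs
    have hcont : d.contains x = true ↔ x ∈ xs := by
      rw [PySem.Dict.contains_iff_mem_keys, hkeys, PySem.Set.mem_ofList]
    simp only [List.foldl_cons, List.foldl_nil]
    by_cases hx : x ∈ xs
    · have hc : d.contains x = true := hcont.mpr hx
      have hxd : x ∈ PySem.List.dedup xs := by
        rw [PySem.List.mem_dedup]; exact hx
      have hmem : (x, (PySem.List.count xs x : Int) - 1) ∈ d.items := by
        rw [ih]; exact List.mem_map_of_mem hxd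
      have hgetD : d.getD x 0 = (PySem.List.count xs x : Int) - 1 :=
        PySem.Dict.getD_of_mem_items d hmem hnd 0
      rw [hc, if_pos rfl, PySem.Dict.items_insert_of_contains d _ hc, ih, hgetD]
      have hded : PySem.List.dedup (xs ++ [x]) = PySem.List.dedup xs := by
        simp only [PySem.List.dedup_eq_ofList, PySem.Set.ofList_append_singleton]
        exact PySem.Set.add_of_mem (by rw [PySem.Set.mem_ofList]; exact hx)
      rw [hded, List.map_map]
      apply List.map_congr_left
      intro k hk
      simp only [Function.comp, PySem.List.count_eq, List.count_append,
        List.count_singleton]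
      by_cases hkx : k = x
      · subst hkx; simp
      · have : (k == x) = false := by simp [hkx]
        simp only [this]
        simp
        exact fun h => hkx h.symm
    · have hc : d.contains x = false := by
        cases h : d.contains x
        · rfl
        · exact absurd (hcont.mp h) hx
      rw [hc, if_neg (by simp), PySem.Dict.items_insert_of_not_contains d _ hc, ih]
      have hded : PySem.List.dedup (xs ++ [x]) = PySem.List.dedup xs ++ [x] := by
        simp only [PySem.List.dedup_eq_ofList, PySem.Set.ofList_append_singleton]
        exact PySem.Set.add_of_not_mem (by rw [PySem.Set.mem_ofList]; exact hx)
      rw [hded, List.map_append]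
      congr 1
      · apply List.map_congr_left
        intro k hk
        have hkx : k ≠ x := by
          intro h; apply hx
          rw [← PySem.List.mem_dedup (xs := xs)]; rw [← h] at *; exact hk
        have : (x == k) = false := by simp [Ne.symm hkx]
        simp [PySem.List.count_eq, List.count_append, List.count_singleton, this]
      · have hcx : PySem.List.count (xs ++ [x]) x = 1 := by
          simp [PySem.List.count_eq, List.count_append, List.count_eq_zero.mpr hx]
        simp [List.count_eq_zero.mpr hx]

-- ===== VERDICT (by name: the statement is the Claim_ definition above) =====
theorem simple_func_spec : Claim_equal_simple_func := by
  intro xs _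
  show simple_func xs = simple_func_alt xs
  unfold simple_func simple_func_alt
  rw [pv_step_eq, pv_items]
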